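-- pv_equiv track=rewrite | github.com/mottybar/Subnet_Calculator | main.py | calculate_number_of_hosts
-- ===== SOURCE A (Python) =====
-- def calculate_number_of_hosts(cidr, number_of_subnets):
--     """
--     calculate the number of hosts
--     number_of_hosts=2**(32-CIDR)
--     number_of_host > user hosts
--     :return: int
--     :rtype:
--     """
--     # 1. from number_of_subnets infer how many bits we need for the subnets
--     bits_for_subnets = 0
--     num_of_bits = 0
--     subnet_num_found = False
--     while num_of_bits <= 32 - cidr and not subnet_num_found:
--         if 2 ** num_of_bits >= number_of_subnets:
--             bits_for_subnets = num_of_bits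
--             subnet_num_found = True
--         num_of_bits += 1
--
--     # 2. calculate the number of hosts
--     hosts = 2 ** (32 - cidr - bits_for_subnets) - 2
--     subnets = 2 ** bits_for_subnets
--     return hosts, subnets
-- ===== SOURCE B (Python) =====
-- def calculate_number_of_hosts(cidr, number_of_subnets):
--     # Closed form: minimal bits so that 2**bits >= number_of_subnets is
--     # (number_of_subnets - 1).bit_length() for number_of_subnets > 1, else 0;
--     # if it does not fit in the 32 - cidr host bits, use the whole network (0 bits).
--     max_bits = 32 - cidr
--     needed = (number_of_subnets - 1).bit_length() if number_of_subnets > 1 else 0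
--     bits_for_subnets = needed if needed <= max_bits else 0
--     return 2 ** (max_bits - bits_for_subnets) - 2, 2 ** bits_for_subnets
-- ===== Notes on version B (the rewrite author's own statement) =====
-- stated objective: simpler
-- what changed: Replaces the bit-search while loop (trying exponents 0..32-cidr) with a direct closed-form computation of the required subnet bits via int.bit_length.
-- outside the precondition, e.g. on calculate_number_of_hosts(33, 1): A returns (-1.5, 1), B returns (-1.5, 1)
import Mathlib
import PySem

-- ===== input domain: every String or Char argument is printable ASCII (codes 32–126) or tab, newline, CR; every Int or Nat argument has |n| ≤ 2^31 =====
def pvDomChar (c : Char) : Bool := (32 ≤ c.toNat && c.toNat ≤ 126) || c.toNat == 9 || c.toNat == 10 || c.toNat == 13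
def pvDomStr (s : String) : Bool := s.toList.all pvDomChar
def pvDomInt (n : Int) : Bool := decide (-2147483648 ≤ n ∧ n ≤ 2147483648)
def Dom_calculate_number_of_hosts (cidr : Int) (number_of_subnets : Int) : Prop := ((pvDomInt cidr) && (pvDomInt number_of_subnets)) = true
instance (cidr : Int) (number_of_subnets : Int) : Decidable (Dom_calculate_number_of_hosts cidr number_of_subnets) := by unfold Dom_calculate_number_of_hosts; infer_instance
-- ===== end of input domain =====

-- B computes the subnet-bit count in closed form with bit_length instead of A's bit-search loop.
-- Pre_ excludes cidr > 32, where Python's 2 ** (negative) makes A (and B) return a float, not an int.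


-- ===== PORT A =====
-- A's while loop; exponent num_of_bits starts at 0 and only grows, so 2 ** num_of_bits is 2 ^ (toNat).
def pvLoopA (cidr number_of_subnets : Int) (bits_for_subnets num_of_bits : Int)
    (subnet_num_found : Bool) : Int :=
  if h : num_of_bits ≤ 32 - cidr ∧ subnet_num_found = false then
    if (2 : Int) ^ num_of_bits.toNat ≥ number_of_subnets then
      pvLoopA cidr number_of_subnets num_of_bits (num_of_bits + 1) true
    else
      pvLoopA cidr number_of_subnets bits_for_subnets (num_of_bits + 1) subnet_num_found
  else bits_for_subnets
termination_by (33 - cidr - num_of_bits).toNat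
decreasing_by all_goals omega

-- exact for cidr ≤ 32 (Pre_): there the final exponents are ≥ 0, as in Python's int result.
def calculate_number_of_hosts (cidr : Int) (number_of_subnets : Int) : Int × Int :=
  let bits_for_subnets := pvLoopA cidr number_of_subnets 0 0 false
  ((2 : Int) ^ (32 - cidr - bits_for_subnets).toNat - 2, (2 : Int) ^ bits_for_subnets.toNat)

-- ===== PORT B =====
def calculate_number_of_hosts_alt (cidr : Int) (number_of_subnets : Int) : Int × Int :=
  let max_bits := 32 - cidr
  let needed : Int :=
    if number_of_subnets > 1 then (PySem.Int.bitLength (number_of_subnets - 1) : Int) else 0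
  let bits_for_subnets := if needed ≤ max_bits then needed else 0
  ((2 : Int) ^ (max_bits - bits_for_subnets).toNat - 2, (2 : Int) ^ bits_for_subnets.toNat)

-- ===== PRECONDITION & SPEC =====
-- Pre_ excludes cidr > 32: there 2 ** (32 - cidr - bits) has a negative exponent and the
-- Python A returns a float (e.g. -1.5), not a value of the declared int type.
def Pre_calculate_number_of_hosts (cidr : Int) (number_of_subnets : Int) : Prop := cidr ≤ 32
instance (cidr : Int) (number_of_subnets : Int) : Decidable (Pre_calculate_number_of_hosts cidr number_of_subnets) := by unfold Pre_calculate_number_of_hosts; infer_instance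
def pvWitness_calculate_number_of_hosts : Int × Int := (24, 4)

def Spec_calculate_number_of_hosts (cidr : Int) (number_of_subnets : Int) (out : Int × Int) : Prop := out = calculate_number_of_hosts_alt cidr number_of_subnets
instance (cidr : Int) (number_of_subnets : Int) (out : Int × Int) : Decidable (Spec_calculate_number_of_hosts cidr number_of_subnets out) := by unfold Spec_calculate_number_of_hosts; infer_instance

-- ===== CLAIM (what is proved, stated in full; the proofs are below) =====
def Claim_equal_calculate_number_of_hosts : Prop := ∀ (cidr : Int) (number_of_subnets : Int), Dom_calculate_number_of_hosts cidr number_of_subnets → Pre_calculate_number_of_hosts cidr number_of_subnets → Spec_calculate_number_of_hosts cidr number_of_subnets (calculate_number_of_hosts cidr number_of_subnets)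

-- ===== LEMMAS AND PROOFS =====

-- the "needed" value of B, as a shorthand for the lemmas
def pvNeeded (n : Int) : Int :=
  if n > 1 then (PySem.Int.bitLength (n - 1) : Int) else 0

theorem pvNeeded_nonneg (n : Int) : 0 ≤ pvNeeded n := by
  unfold pvNeeded; split <;> positivity

-- 2 ^ k ≥ n  iff  k reaches B's closed-form bit count
theorem pvKey (n : Int) (k : Nat) : (n ≤ (2 : Int) ^ k) ↔ pvNeeded n ≤ (k : Int) := by
  have hc2 : (((2 : Nat) ^ k : Nat) : Int) = (2 : Int) ^ k := by push_cast; ring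
  unfold pvNeeded
  split
  · rename_i h1
    have hb := PySem.Int.lt_two_pow_bitLength (n - 1)
    have hb2 := PySem.Int.two_pow_bitLength_le (n - 1) (by omega)
    constructor
    · intro hle
      by_contra hc
      push_neg at hc
      have hkB : k + 1 ≤ PySem.Int.bitLength (n - 1) := by exact_mod_cast hc
      have h3 : (2 : Nat) ^ k ≤ (n - 1).natAbs :=
        le_trans (Nat.pow_le_pow_right (by norm_num) (by omega)) hb2
      omega
    · intro hle
      have hkB : PySem.Int.bitLength (n - 1) ≤ k := by exact_mod_cast hle
      have h3 : (n - 1).natAbs < (2 : Nat) ^ k :=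
        lt_of_lt_of_le hb (Nat.pow_le_pow_right (by norm_num) hkB)
      omega
  · rename_i h1
    have : (1 : Int) ≤ 2 ^ k := one_le_pow₀ (by norm_num)
    constructor
    · intro _; exact_mod_cast Nat.zero_le k
    · intro _; omega

-- once found, the loop returns its bits accumulator
theorem pvLoopA_found (cidr n b k : Int) : pvLoopA cidr n b k true = b := by
  rw [pvLoopA]; simp

-- the loop invariant: entering at k with 0 ≤ k ≤ needed, the loop returns B's closed form
theorem pvLoopA_eq (cidr n : Int) (k : Int) (hk : 0 ≤ k) (hle : k ≤ pvNeeded n) :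
    pvLoopA cidr n 0 k false = (if pvNeeded n ≤ 32 - cidr then pvNeeded n else 0) := by
  rw [pvLoopA]
  by_cases hcond : k ≤ 32 - cidr
  · simp only [hcond, true_and]
    have hcast : ((k.toNat : Int)) = k := by omega
    by_cases hge : (2 : Int) ^ k.toNat ≥ n
    · have hNk : pvNeeded n ≤ k := by
        have := (pvKey n k.toNat).mp hge; omega
      have hkN : k = pvNeeded n := le_antisymm hle hNk
      simp only [reduceDIte, ge_iff_le, hge, if_pos, pvLoopA_found]
      rw [if_pos (by omega)]; omega
    · have hNk : ¬ pvNeeded n ≤ k := by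
        intro hc
        exact hge ((pvKey n k.toNat).mpr (by omega))
      have := pvLoopA_eq cidr n (k + 1) (by omega) (by omega)
      simp only [reduceDIte, ge_iff_le]
      rw [if_neg (by omega)]
      exact this
  · simp only [hcond, false_and, reduceDIte]
    rw [if_neg (by omega)]
termination_by (33 - cidr - k).toNat
decreasing_by omega

-- ===== VERDICT (by name: the statement is the Claim_ definition above) =====
theorem calculate_number_of_hosts_spec : Claim_equal_calculate_number_of_hosts := by
  intro cidr n _ _
  unfold Spec_calculate_number_of_hosts calculate_number_of_hosts calculate_number_of_hosts_alt
  have h := pvLoopA_eq cidr n 0 le_rfl (pvNeeded_nonneg n)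
  simp only [h, pvNeeded]
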